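-- pv_equiv track=rewrite | github.com/mohammadfaiizan/ProjectI | DSA/Problem/Queue_Stack/09_Competitive_Programming_Patterns/1541_Minimum_Insertions_to_Balance_a_Parentheses_String.py | minInsertions_counter
-- ===== SOURCE A (Python) =====
-- def minInsertions_counter(s: str) -> int:
--     """
--     Approach 2: Counter-based Solution
--
--     Use counters to track balance and insertions.
--
--     Time: O(n), Space: O(1)
--     """
--     insertions = 0
--     open_needed = 0  # Number of '(' that need matching
--
--     i = 0
--     while i < len(s):
--         if s[i] == '(':
--             open_needed += 1
--             i += 1
--         else:  # s[i] == ')'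
--             # Check if we have '))'
--             if i + 1 < len(s) and s[i + 1] == ')':
--                 # We have '))'
--                 if open_needed > 0:
--                     open_needed -= 1  # Match with existing '('
--                 else:
--                     insertions += 1  # Need to insert '('
--                 i += 2
--             else:
--                 # We have single ')', need another ')'
--                 if open_needed > 0:
--                     open_needed -= 1  # Match with existing '('
--                     insertions += 1  # Need to insert another ')'
--                 else:
--                     insertions += 2  # Need to insert '(' and ')'
--                 i += 1
--
--     # Each remaining open_needed requires '))'
--     insertions += open_needed * 2
--
--     return insertions
-- ===== SOURCE B (Python) =====
-- def minInsertions_counter(s: str) -> int: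
--     """Two stages: (1) tokenize into +-1 deltas (an opener is +1; a closer is -1,
--     consuming a following ')' as its pair, else counted as a lone closer);
--     (2) closed form from prefix sums: lone + m + 2*(total + m), where
--     m = -(minimum prefix sum, capped at 0). No greedy counters or branching on
--     the current open count."""
--     stack = list(s)
--     stack.reverse()
--     deltas = []
--     lone = 0
--     while stack:
--         c = stack.pop()
--         if c == '(':
--             deltas.append(1)
--         elif stack and stack[-1] == ')':
--             stack.pop()
--             deltas.append(-1)
--         else:
--             lone += 1
--             deltas.append(-1)
--     run = 0
--     low = 0
--     for d in deltas:
--         run += d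
--         if run < low:
--             low = run
--     m = -low
--     return lone + m + 2 * (run + m)
-- ===== Notes on version B (the rewrite author's own statement) =====
-- stated objective: alternative
-- what changed: Replaced A's greedy simulation (insertions/open_needed counters with branching on open_needed>0 at each closer) by a two-stage method: tokenize the string into +-1 deltas plus a lone-closer count, then compute the answer in closed form from the prefix-sum minimum: lone + m + 2*(total + m) with m = -min(0, prefix sums).
import Mathlib
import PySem

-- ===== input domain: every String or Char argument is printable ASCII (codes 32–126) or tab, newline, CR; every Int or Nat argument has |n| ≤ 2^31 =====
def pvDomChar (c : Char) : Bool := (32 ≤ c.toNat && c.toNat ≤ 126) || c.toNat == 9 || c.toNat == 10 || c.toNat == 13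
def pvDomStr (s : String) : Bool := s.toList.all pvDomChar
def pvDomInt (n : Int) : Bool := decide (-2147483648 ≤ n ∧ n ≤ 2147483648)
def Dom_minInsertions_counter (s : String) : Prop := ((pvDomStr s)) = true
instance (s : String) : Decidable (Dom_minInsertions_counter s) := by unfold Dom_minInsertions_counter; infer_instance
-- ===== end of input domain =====

-- B replaces A's greedy counter simulation (insertions/open_needed with branching on
-- open_needed > 0) by two stages: a tokenizer producing ±1 deltas plus a lone-closer
-- count, then a closed form from the prefix-sum minimum; equal on all inputs (alternative).

-- ===== PORT A =====
-- A's while loop over i with step 1 or 2, as recursion on the remaining characters;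
-- `rest.head? = some ')'` is the `i + 1 < len(s) and s[i+1] == ')'` lookahead and
-- `rest.tail` is `i += 2`.
def pvLoopA (l : List Char) (ins opn : Int) : Int :=
  match l with
  | [] => ins + opn * 2
  | c :: rest =>
    if c = '(' then pvLoopA rest ins (opn + 1)
    else if rest.head? = some ')' then
      if opn > 0 then pvLoopA rest.tail ins (opn - 1) else pvLoopA rest.tail (ins + 1) opn
    else
      if opn > 0 then pvLoopA rest (ins + 1) (opn - 1) else pvLoopA rest (ins + 2) opn
termination_by l.length
decreasing_by all_goals (simp [List.length_tail]; try omega)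

def minInsertions_counter (s : String) : Int := pvLoopA s.toList 0 0

-- ===== PORT B =====
-- B's first stage: the while/pop tokenizer over the character stack, as the obvious
-- structural recursion; `rest.head? = some ')'` is `stack and stack[-1] == ')'`.
-- Returns (deltas, lone-closer count).
def pvTok (l : List Char) : List Int × Int :=
  match l with
  | [] => ([], 0)
  | c :: rest =>
    if c = '(' then
      let p := pvTok rest; (1 :: p.1, p.2)
    else if rest.head? = some ')' then
      let p := pvTok rest.tail; (-1 :: p.1, p.2)
    else
      let p := pvTok rest; (-1 :: p.1, p.2 + 1)
termination_by l.length
decreasing_by all_goals (simp [List.length_tail]; try omega)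

-- B's second stage: the `for d in deltas` fold carrying (run, low)
def pvStepPM (acc : Int × Int) (d : Int) : Int × Int :=
  (acc.1 + d, if acc.1 + d < acc.2 then acc.1 + d else acc.2)

def minInsertions_counter_alt (s : String) : Int :=
  let p := pvTok s.toList
  let rl := p.1.foldl pvStepPM (0, 0)
  let m := -rl.2
  p.2 + m + 2 * (rl.1 + m)

-- ===== PRECONDITION & SPEC =====
def Spec_minInsertions_counter (s : String) (out : Int) : Prop := out = minInsertions_counter_alt s
instance (s : String) (out : Int) : Decidable (Spec_minInsertions_counter s out) := by unfold Spec_minInsertions_counter; infer_instance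

-- ===== CLAIM (what is proved, stated in full; the proofs are below) =====
def Claim_equal_minInsertions_counter : Prop := ∀ (s : String), Dom_minInsertions_counter s → Spec_minInsertions_counter s (minInsertions_counter s)

-- ===== LEMMAS AND PROOFS =====

-- sum of the deltas
def pvSum : List Int → Int
  | [] => 0
  | d :: ds => d + pvSum ds

-- minimum of 0 and all nonempty prefix sums
def pvLow : List Int → Int
  | [] => 0
  | d :: ds => min 0 (d + pvLow ds)

lemma pvLow_nonpos (ds : List Int) : pvLow ds ≤ 0 := by
  cases ds with
  | nil => simp [pvLow]
  | cons d ds => simp [pvLow]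

lemma pvTok_nil : pvTok [] = ([], 0) := by rw [pvTok]

lemma pvTok_cons (c : Char) (rest : List Char) :
    pvTok (c :: rest) =
      if c = '(' then ((1 : Int) :: (pvTok rest).1, (pvTok rest).2)
      else if rest.head? = some ')' then ((-1 : Int) :: (pvTok rest.tail).1, (pvTok rest.tail).2)
      else ((-1 : Int) :: (pvTok rest).1, (pvTok rest).2 + 1) := by
  rw [pvTok]

lemma pvFold_eq (ds : List Int) : ∀ (a b : Int), b ≤ a →
    ds.foldl pvStepPM (a, b) = (a + pvSum ds, min b (a + pvLow ds)) := by
  induction ds with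
  | nil => intro a b h; simp [pvSum, pvLow]; omega
  | cons d ds ih =>
    intro a b h
    simp only [List.foldl_cons]
    rw [show pvStepPM (a, b) d = (a + d, min b (a + d)) by
      simp [pvStepPM]; split <;> omega]
    rw [ih (a + d) (min b (a + d)) (by omega)]
    have hl := pvLow_nonpos ds
    simp only [pvSum, pvLow, Prod.mk.injEq]
    exact ⟨by ring, by omega⟩

-- the closed form B computes, parameterised by an initial open count
def pvForm (ds : List Int) (lone opn : Int) : Int :=
  lone + max 0 (-(opn + pvLow ds)) + 2 * (opn + pvSum ds + max 0 (-(opn + pvLow ds)))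

-- the main invariant: A's greedy loop equals B's closed form over B's tokens
lemma pvKey : ∀ (n : Nat) (l : List Char), l.length ≤ n → ∀ (ins opn : Int), 0 ≤ opn →
    pvLoopA l ins opn = ins + pvForm (pvTok l).1 (pvTok l).2 opn := by
  intro n
  induction n with
  | zero =>
    intro l hl ins opn hopn
    have : l = [] := List.eq_nil_of_length_eq_zero (Nat.le_zero.mp hl)
    subst this
    rw [pvLoopA, pvTok_nil]
    simp only [pvForm, pvLow, pvSum]
    omega
  | succ n ih =>
    intro l hl ins opn hopn
    match l with
    | [] =>
      rw [pvLoopA, pvTok_nil]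
      simp only [pvForm, pvLow, pvSum]
      omega
    | c :: rest =>
      have hlen : rest.length ≤ n := by simpa using hl
      rw [pvLoopA, pvTok_cons]
      by_cases hc : c = '('
      · rw [if_pos hc, if_pos hc, ih rest hlen ins (opn + 1) (by omega)]
        have hl2 := pvLow_nonpos (pvTok rest).1
        simp only [pvForm, pvLow, pvSum]
        omega
      · rw [if_neg hc, if_neg hc]
        by_cases hh : rest.head? = some ')'
        · rw [if_pos hh, if_pos hh]
          obtain ⟨rest2, hr⟩ : ∃ rest2, rest = ')' :: rest2 := by
            cases rest with
            | nil => simp at hh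
            | cons a b =>
              simp only [List.head?_cons, Option.some.injEq] at hh
              exact ⟨b, by rw [hh]⟩
          subst hr
          simp only [List.tail_cons]
          have hlen2 : rest2.length ≤ n := by simp at hl; omega
          have hl2 := pvLow_nonpos (pvTok rest2).1
          by_cases h : opn > 0
          · rw [if_pos h, ih rest2 hlen2 ins (opn - 1) (by omega)]
            simp only [pvForm, pvLow, pvSum]
            omega
          · rw [if_neg h, ih rest2 hlen2 (ins + 1) opn hopn]
            simp only [pvForm, pvLow, pvSum]
            omega
        · rw [if_neg hh, if_neg hh]
          have hl2 := pvLow_nonpos (pvTok rest).1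
          by_cases h : opn > 0
          · rw [if_pos h, ih rest hlen (ins + 1) (opn - 1) (by omega)]
            simp only [pvForm, pvLow, pvSum]
            omega
          · rw [if_neg h, ih rest hlen (ins + 2) opn hopn]
            simp only [pvForm, pvLow, pvSum]
            omega

-- ===== VERDICT (by name: the statement is the Claim_ definition above) =====
theorem minInsertions_counter_spec : Claim_equal_minInsertions_counter := by
  intro s _
  unfold Spec_minInsertions_counter minInsertions_counter
  rw [pvKey s.toList.length s.toList le_rfl 0 0 le_rfl]
  show 0 + pvForm (pvTok s.toList).1 (pvTok s.toList).2 0 =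
    (pvTok s.toList).2 + -(((pvTok s.toList).1.foldl pvStepPM (0, 0)).2) +
      2 * (((pvTok s.toList).1.foldl pvStepPM (0, 0)).1 +
        -(((pvTok s.toList).1.foldl pvStepPM (0, 0)).2))
  rw [pvFold_eq (pvTok s.toList).1 0 0 le_rfl]
  have hl2 := pvLow_nonpos (pvTok s.toList).1
  simp only [pvForm]
  omega
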